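-- pv_equiv track=rewrite | github.com/csaszargellert/alga | kollokvium/land-acquisition.py | minimum_cost_land_acquisition
-- ===== SOURCE A (Python) =====
-- class ConvexHullOptimization:
--     def __init__(self):
--         self.slopes = []
--         self.intercepts = []
--         self.pointer = 0 # Tracks the best line for the previous query
--
--     def is_bad(self, l1, l2, l3):
--         """
--         Checks if line `l2` is irrelevant between lines `l1` and `l3`.
--         """
--         # Cross multiplication to avoid precision issues in floating-point division
--         return (self.intercepts[l3] - self.intercepts[l1]) * (self.slopes[l1] - self.slopes[l2]) < \
--                (self.intercepts[l2] - self.intercepts[l1]) * (self.slopes[l1] - self.slopes[l3])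
--
--     def add_line(self, slope, intercept):
--         """
--         Adds a new line with given slope and intercept.
--         """
--         self.slopes.append(slope)
--         self.intercepts.append(intercept)
--
--         # Remove the second last line if it becomes irrelevant
--         while len(self.slopes) >= 3 and self.is_bad(len(self.slopes) - 3, len(self.slopes) - 2, len(self.slopes) - 1):
--             self.slopes.pop(-2)
--             self.intercepts.pop(-2)
--
--     def query(self, x):
--         """
--         Returns the minimum y-coordinate for a given x-coordinate by finding the best line.
--         """
--         # Adjust the pointer if it has gone out of bounds
--         if self.pointer >= len(self.slopes):
--             self.pointer = len(self.slopes) - 1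
--
--         # Move pointer to the right as long as it leads to a better result
--         while self.pointer < len(self.slopes) - 1 and \
--                 self.slopes[self.pointer + 1] * x + self.intercepts[self.pointer + 1] < \
--                 self.slopes[self.pointer] * x + self.intercepts[self.pointer]:
--             self.pointer += 1
--
--         return self.slopes[self.pointer] * x + self.intercepts[self.pointer]
--
-- def minimum_cost_land_acquisition(plots):
--     # Sort plots by width and filter by height to remove irrelevant plots
--     plots.sort()
--     filtered = []
--
--     for width, height in plots:
--         # Remove plots that are completely dominated by the current one
--         while filtered and filtered[-1][1] <= height:
--             filtered.pop()
--         filtered.append((width, height))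
--
--     # Initialize Convex Hull Optimization
--     cht = ConvexHullOptimization()
--
--     # Add the first rectangle
--     cht.add_line(filtered[0][1], 0) # slope = height, intercept = 0
--     cost = 0
--
--     # Process remaining rectangles
--     for i in range(len(filtered)):
--         width, height = filtered[i]
--         cost = cht.query(width)
--         if i < len(filtered) - 1:
--             cht.add_line(filtered[i + 1][1], cost)
--
--     return cost
-- ===== SOURCE B (Python) =====
-- def minimum_cost_land_acquisition(plots):
--     plots.sort()
--     n = len(plots)
--     # keep a plot iff no later (in sorted order) plot has height >= its height
--     filtered = [plots[i] for i in range(n)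
--                 if all(plots[j][1] < plots[i][1] for j in range(i + 1, n))]
--     dp = []
--     for i in range(len(filtered)):
--         w = filtered[i][0]
--         dp.append(min(filtered[j][1] * w + (dp[j - 1] if j > 0 else 0)
--                       for j in range(i + 1)))
--     return dp[-1]
-- ===== Notes on version B (the rewrite author's own statement) =====
-- stated objective: simpler
-- what changed: Replaces the convex-hull-trick class (hull lines, is_bad cross-multiplication pops, moving pointer) with a plain quadratic DP that takes the minimum over all previous split points directly, and replaces the stack-based dominance filter with a direct 'no later plot is at least as high' comprehension; both A and B sort plots in place and raise IndexError on an empty list (excluded by Pre_).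
import Mathlib
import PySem

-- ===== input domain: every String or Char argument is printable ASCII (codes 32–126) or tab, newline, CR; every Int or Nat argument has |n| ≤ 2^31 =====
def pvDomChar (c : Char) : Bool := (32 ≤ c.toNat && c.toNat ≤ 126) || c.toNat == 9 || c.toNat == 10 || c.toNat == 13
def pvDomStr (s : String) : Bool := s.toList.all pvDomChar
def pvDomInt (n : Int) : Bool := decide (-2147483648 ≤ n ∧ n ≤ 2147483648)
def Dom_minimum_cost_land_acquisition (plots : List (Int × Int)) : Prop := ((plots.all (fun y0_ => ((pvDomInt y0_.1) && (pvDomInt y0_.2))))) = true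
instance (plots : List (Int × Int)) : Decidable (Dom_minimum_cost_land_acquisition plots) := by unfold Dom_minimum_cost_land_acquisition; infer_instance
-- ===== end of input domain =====

-- B replaces A's convex-hull-trick DP (hull lines, cross-multiplied pops, moving pointer)
-- by a plain quadratic DP taking the minimum over all split points directly.  Both A and B
-- sort `plots` in place (the claim is about the return value only) and both raise
-- IndexError on the empty list, which Pre_ excludes.

-- ===== PORT A =====

def aPopDom (fl : List (Int × Int)) (height : Int) : List (Int × Int) :=
  if fl ≠ [] ∧ (PySem.List.pyGetD fl (-1) (0, 0)).2 ≤ height then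
    aPopDom fl.dropLast height
  else fl
termination_by fl.length
decreasing_by simp [List.length_dropLast]; cases fl <;> simp_all

def chtIsBad (S B : List Int) (l1 l2 l3 : Int) : Bool :=
  decide ((PySem.List.pyGetD B l3 0 - PySem.List.pyGetD B l1 0) *
            (PySem.List.pyGetD S l1 0 - PySem.List.pyGetD S l2 0) <
          (PySem.List.pyGetD B l2 0 - PySem.List.pyGetD B l1 0) *
            (PySem.List.pyGetD S l1 0 - PySem.List.pyGetD S l3 0))

def popSnd {α : Type} (xs : List α) : List α :=
  xs.take (xs.length - 2) ++ xs.drop (xs.length - 1)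

def chtAddLoop (S B : List Int) : List Int × List Int :=
  if 3 ≤ S.length ∧
      chtIsBad S B ((S.length : Int) - 3) ((S.length : Int) - 2) ((S.length : Int) - 1) then
    chtAddLoop (popSnd S) (popSnd B)
  else (S, B)
termination_by S.length
decreasing_by rename_i h; simp [popSnd]; omega

def chtAdd (S B : List Int) (slope intercept : Int) : List Int × List Int :=
  chtAddLoop (S ++ [slope]) (B ++ [intercept])

def chtQueryLoop (S B : List Int) (p x : Int) : Int :=
  if p < (S.length : Int) - 1 ∧
      PySem.List.pyGetD S (p + 1) 0 * x + PySem.List.pyGetD B (p + 1) 0 <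
        PySem.List.pyGetD S p 0 * x + PySem.List.pyGetD B p 0 then
    chtQueryLoop S B (p + 1) x
  else p
termination_by ((S.length : Int) - p).toNat
decreasing_by rename_i h; omega

def chtQuery (S B : List Int) (p x : Int) : Int × Int :=
  let p1 := if p ≥ (S.length : Int) then (S.length : Int) - 1 else p
  let p2 := chtQueryLoop S B p1 x
  (PySem.List.pyGetD S p2 0 * x + PySem.List.pyGetD B p2 0, p2)

def aStep (filtered : List (Int × Int)) (st : List Int × List Int × Int × Int) (i : Int) :
    List Int × List Int × Int × Int :=
  match st with
  | (S, B, p, _cost) =>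
    let width := (PySem.List.pyGetD filtered i (0, 0)).1
    let qr := chtQuery S B p width
    let cost := qr.1
    let p := qr.2
    if i < (filtered.length : Int) - 1 then
      let ad := chtAdd S B (PySem.List.pyGetD filtered (i + 1) (0, 0)).2 cost
      (ad.1, ad.2, p, cost)
    else (S, B, p, cost)

def minimum_cost_land_acquisition (plots : List (Int × Int)) : Int :=
  let plots := PySem.List.sorted2 plots (fun t => t.1) (fun t => t.2)
  let filtered := plots.foldl (fun fl wh => aPopDom fl wh.2 ++ [wh]) []
  let sb := chtAdd [] [] (PySem.List.pyGetD filtered 0 (0, 0)).2 0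
  let st := (PySem.List.pyRange 0 (filtered.length : Int) 1).foldl (aStep filtered)
      (sb.1, sb.2, 0, 0)
  st.2.2.2

-- ===== PORT B =====

def bMin (xs : List Int) : Int := (PySem.List.min? xs (fun v => v)).getD 0

def bStep (filtered : List (Int × Int)) (dp : List Int) (i : Int) : List Int :=
  let w := (PySem.List.pyGetD filtered i (0, 0)).1
  dp ++ [bMin ((PySem.List.pyRange 0 (i + 1) 1).map (fun j =>
      (PySem.List.pyGetD filtered j (0, 0)).2 * w +
        (if 0 < j then PySem.List.pyGetD dp (j - 1) 0 else 0)))]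

def minimum_cost_land_acquisition_alt (plots : List (Int × Int)) : Int :=
  let plots := PySem.List.sorted2 plots (fun t => t.1) (fun t => t.2)
  let n : Int := (plots.length : Int)
  let filtered := (PySem.List.pyRange 0 n 1).filterMap (fun i =>
    if (PySem.List.pyRange (i + 1) n 1).all (fun j =>
        decide ((PySem.List.pyGetD plots j (0, 0)).2 < (PySem.List.pyGetD plots i (0, 0)).2)) then
      some (PySem.List.pyGetD plots i (0, 0))
    else none)
  let dp := (PySem.List.pyRange 0 (filtered.length : Int) 1).foldl (bStep filtered) []
  PySem.List.pyGetD dp (-1) 0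

-- ===== PRECONDITION & SPEC =====
-- Pre_ excludes exactly the empty list, on which A raises IndexError (at filtered[0]).
def Pre_minimum_cost_land_acquisition (plots : List (Int × Int)) : Prop := plots ≠ []
instance (plots : List (Int × Int)) : Decidable (Pre_minimum_cost_land_acquisition plots) := by
  unfold Pre_minimum_cost_land_acquisition; infer_instance

def pvWitness_minimum_cost_land_acquisition : (List (Int × Int)) := [(1, 2), (3, 1)]

def Spec_minimum_cost_land_acquisition (plots : List (Int × Int)) (out : Int) : Prop :=
  out = minimum_cost_land_acquisition_alt plots
instance (plots : List (Int × Int)) (out : Int) :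
    Decidable (Spec_minimum_cost_land_acquisition plots out) := by
  unfold Spec_minimum_cost_land_acquisition; infer_instance

-- ===== CLAIM (what is proved, stated in full; the proofs are below) =====
def Claim_equal_minimum_cost_land_acquisition : Prop :=
  ∀ (plots : List (Int × Int)), Dom_minimum_cost_land_acquisition plots →
    Pre_minimum_cost_land_acquisition plots →
    Spec_minimum_cost_land_acquisition plots (minimum_cost_land_acquisition plots)

-- ===== LEMMAS AND PROOFS =====

def lval (l : Int × Int) (x : Int) : Int := l.1 * x + l.2

def imin : List Int → Int
  | [] => 0
  | a :: t => t.foldl min a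

def lmin (L : List (Int × Int)) (x : Int) : Int := imin (L.map (fun l => lval l x))

def isBadL (l1 l2 l3 : Int × Int) : Prop :=
  (l3.2 - l1.2) * (l1.1 - l2.1) < (l2.2 - l1.2) * (l1.1 - l3.1)

def decSlope (L : List (Int × Int)) : Prop := L.Pairwise (fun a b => b.1 < a.1)

def goodL (L : List (Int × Int)) : Prop :=
  ∀ k : Nat, k + 2 < L.length → ¬ isBadL (L.getD k (0, 0)) (L.getD (k + 1) (0, 0)) (L.getD (k + 2) (0, 0))

def goodExceptLast (L : List (Int × Int)) : Prop :=
  ∀ k : Nat, k + 3 < L.length → ¬ isBadL (L.getD k (0, 0)) (L.getD (k + 1) (0, 0)) (L.getD (k + 2) (0, 0))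

theorem lval_bad_pop {l1 l2 l3 : Int × Int} (hs1 : l2.1 < l1.1) (hs2 : l3.1 < l2.1)
    (hbad : isBadL l1 l2 l3) (x : Int) : lval l1 x ≤ lval l2 x ∨ lval l3 x ≤ lval l2 x := by
  obtain ⟨s1, b1⟩ := l1; obtain ⟨s2, b2⟩ := l2; obtain ⟨s3, b3⟩ := l3
  simp only [lval, isBadL] at *
  by_contra h
  push_neg at h
  obtain ⟨h1, h2⟩ := h
  nlinarith [mul_pos (sub_pos.mpr hs1) (sub_pos.mpr hs2)]

theorem lval_good_step {l1 l2 l3 : Int × Int} (hs1 : l2.1 < l1.1) (hs2 : l3.1 < l2.1)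
    (hgood : ¬ isBadL l1 l2 l3) (x : Int) (h12 : lval l1 x ≤ lval l2 x) :
    lval l2 x ≤ lval l3 x := by
  obtain ⟨s1, b1⟩ := l1; obtain ⟨s2, b2⟩ := l2; obtain ⟨s3, b3⟩ := l3
  simp only [lval, isBadL, not_lt] at *
  nlinarith [mul_pos (sub_pos.mpr hs1) (sub_pos.mpr hs2)]

theorem lval_slope_mono {a b : Int × Int} (hs : b.1 < a.1) {x x' : Int} (hx : x ≤ x')
    (h : lval b x < lval a x) : lval b x' < lval a x' := by
  obtain ⟨s1, b1⟩ := a; obtain ⟨s2, b2⟩ := b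
  simp only [lval] at *
  nlinarith [mul_le_mul_of_nonneg_left hx (by omega : (0:Int) ≤ s1 - s2)]

theorem foldl_min_min (t : List Int) (a b : Int) :
    t.foldl min (min a b) = min a (t.foldl min b) := by
  induction t generalizing b with
  | nil => rfl
  | cons c t ih => simp only [List.foldl_cons, min_assoc, ih]

theorem imin_cons (a : Int) (t : List Int) (ht : t ≠ []) :
    imin (a :: t) = min a (imin t) := by
  cases t with
  | nil => simp at ht
  | cons b t' => simp only [imin, List.foldl_cons, foldl_min_min]

theorem imin_le (l : List Int) (v : Int) (hv : v ∈ l) : imin l ≤ v := by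
  cases l with
  | nil => simp at hv
  | cons a t =>
    show t.foldl min a ≤ v
    rcases List.mem_cons.mp hv with h | h
    · subst h
      exact (PySem.List.foldl_min_le t v).1
    · exact (PySem.List.foldl_min_le t a).2 v h

theorem imin_mem (l : List Int) (hl : l ≠ []) : imin l ∈ l := by
  cases l with
  | nil => simp at hl
  | cons a t =>
    rcases PySem.List.foldl_min_mem t a with h | h
    · have he : imin (a :: t) = t.foldl min a := rfl
      rw [he, h]; exact List.mem_cons_self ..
    · exact List.mem_cons_of_mem a h

theorem imin_append (l l' : List Int) (h : l ≠ []) (h' : l' ≠ []) :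
    imin (l ++ l') = min (imin l) (imin l') := by
  induction l with
  | nil => simp at h
  | cons a t ih =>
    cases t with
    | nil =>
      rw [List.singleton_append, imin_cons a l' h']
      rfl
    | cons b t' =>
      rw [List.cons_append, imin_cons a ((b :: t') ++ l') (by simp),
        imin_cons a (b :: t') (by simp), ih (by simp), min_assoc]

theorem lmin_append_singleton (L : List (Int × Int)) (b : Int × Int) (x : Int) (hL : L ≠ []) :
    lmin (L ++ [b]) x = min (lmin L x) (lval b x) := by
  simp only [lmin, List.map_append, List.map_cons, List.map_nil]
  rw [imin_append _ _ (by simpa using hL) (by simp)]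
  rfl

theorem lmin_le (L : List (Int × Int)) (l : Int × Int) (hl : l ∈ L) (x : Int) :
    lmin L x ≤ lval l x :=
  imin_le _ _ (List.mem_map.mpr ⟨l, hl, rfl⟩)

theorem lmin_attained (L : List (Int × Int)) (x : Int) (hL : L ≠ []) :
    ∃ k : Nat, k < L.length ∧ lmin L x = lval (L.getD k (0, 0)) x := by
  have h := imin_mem (L.map (fun l => lval l x)) (by simpa using hL)
  rw [List.mem_map] at h
  obtain ⟨l, hl, hv⟩ := h
  obtain ⟨k, hk, rfl⟩ := List.getElem_of_mem hl
  refine ⟨k, hk, ?_⟩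
  rw [lmin, ← hv, List.getD_eq_getElem _ _ hk]

theorem getD_map_fst (X : List (Int × Int)) (n : Nat) (hn : n < X.length) :
    (X.map Prod.fst).getD n 0 = (X.getD n (0, 0)).1 := by
  rw [List.getD_eq_getElem _ _ (by simpa using hn), List.getD_eq_getElem _ _ hn, List.getElem_map]

theorem getD_map_snd (X : List (Int × Int)) (n : Nat) (hn : n < X.length) :
    (X.map Prod.snd).getD n 0 = (X.getD n (0, 0)).2 := by
  rw [List.getD_eq_getElem _ _ (by simpa using hn), List.getD_eq_getElem _ _ hn, List.getElem_map]

theorem pyGetD_map_fst_int (X : List (Int × Int)) (n : Nat) (hn : n < X.length) :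
    PySem.List.pyGetD (X.map Prod.fst) ((n : Nat) : Int) 0 = (X.getD n (0, 0)).1 := by
  rw [PySem.List.pyGetD_natCast, getD_map_fst X n hn]

theorem pyGetD_map_snd_int (X : List (Int × Int)) (n : Nat) (hn : n < X.length) :
    PySem.List.pyGetD (X.map Prod.snd) ((n : Nat) : Int) 0 = (X.getD n (0, 0)).2 := by
  rw [PySem.List.pyGetD_natCast, getD_map_snd X n hn]

theorem chtIsBad_eq (X : List (Int × Int)) (h : 3 ≤ X.length) :
    (chtIsBad (X.map Prod.fst) (X.map Prod.snd)
        (((X.map Prod.fst).length : Int) - 3) (((X.map Prod.fst).length : Int) - 2)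
        (((X.map Prod.fst).length : Int) - 1) = true)
      ↔ isBadL (X.getD (X.length - 3) (0, 0)) (X.getD (X.length - 2) (0, 0))
          (X.getD (X.length - 1) (0, 0)) := by
  have e3 : (((X.map Prod.fst).length : Int) - 3) = ((X.length - 3 : Nat) : Int) := by
    simp; omega
  have e2 : (((X.map Prod.fst).length : Int) - 2) = ((X.length - 2 : Nat) : Int) := by
    simp; omega
  have e1 : (((X.map Prod.fst).length : Int) - 1) = ((X.length - 1 : Nat) : Int) := by
    simp; omega
  rw [chtIsBad, e1, e2, e3,
    pyGetD_map_fst_int X _ (by omega), pyGetD_map_fst_int X _ (by omega),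
    pyGetD_map_fst_int X _ (by omega), pyGetD_map_snd_int X _ (by omega),
    pyGetD_map_snd_int X _ (by omega), pyGetD_map_snd_int X _ (by omega)]
  rw [isBadL, decide_eq_true_iff]

theorem popSnd_map {α β : Type} (f : α → β) (xs : List α) :
    popSnd (xs.map f) = (popSnd xs).map f := by
  simp [popSnd, List.map_take, List.map_drop]

theorem popSnd_two {α : Type} (l : List α) (b c : α) :
    popSnd (l ++ [b, c]) = l ++ [c] := by
  have h1 : (l ++ [b, c]).length - 2 = l.length := by simp
  have h2 : (l ++ [b, c]).length - 1 = l.length + 1 := by simp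
  rw [popSnd, h1, h2, List.take_left' rfl]
  congr 1
  rw [show l.length + 1 = (l ++ [b]).length by simp, show l ++ [b, c] = (l ++ [b]) ++ [c] by simp,
    List.drop_left]

theorem two_from_right {α : Type} (H : List α) (h : 2 ≤ H.length) :
    ∃ H₂ a b, H = H₂ ++ [a, b] := by
  induction H using List.reverseRecOn with
  | nil => simp at h
  | append_singleton l c ih =>
    cases hl : l.reverse with
    | nil =>
      have : l = [] := by simpa using congrArg List.reverse hl
      subst this; simp at h
    | cons d l' =>
      have : l = l'.reverse ++ [d] := by
        have := congrArg List.reverse hl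
        simpa using this
      exact ⟨l'.reverse, d, c, by rw [this]; simp⟩

theorem getD_trip_a {α : Type} [Inhabited α] (l : List α) (a b c : α) (d : α) :
    (l ++ [a, b, c]).getD ((l ++ [a, b, c]).length - 3) d = a := by
  have h : (l ++ [a, b, c]).length - 3 = l.length := by simp
  rw [h, List.getD_append_right l [a, b, c] d l.length (le_refl _)]
  simp

theorem getD_trip_b {α : Type} [Inhabited α] (l : List α) (a b c : α) (d : α) :
    (l ++ [a, b, c]).getD ((l ++ [a, b, c]).length - 2) d = b := by
  have h : (l ++ [a, b, c]).length - 2 = l.length + 1 := by simp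
  rw [h, List.getD_append_right l [a, b, c] d (l.length + 1) (by omega)]
  simp

theorem getD_trip_c {α : Type} [Inhabited α] (l : List α) (a b c : α) (d : α) :
    (l ++ [a, b, c]).getD ((l ++ [a, b, c]).length - 1) d = c := by
  have h : (l ++ [a, b, c]).length - 1 = l.length + 2 := by simp
  rw [h, List.getD_append_right l [a, b, c] d (l.length + 2) (by omega)]
  simp

theorem pop_min_pres (H₂ : List (Int × Int)) (a b newl : Int × Int)
    (hs1 : b.1 < a.1) (hs2 : newl.1 < b.1)
    (hbad : isBadL a b newl) (x : Int) :
    lmin ((H₂ ++ [a]) ++ [newl]) x = lmin (H₂ ++ [a, b, newl]) x := by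
  have h1 : H₂ ++ [a, b, newl] = (((H₂ ++ [a]) ++ [b]) ++ [newl]) := by simp
  rw [h1, lmin_append_singleton ((H₂ ++ [a]) ++ [b]) newl x (by simp),
    lmin_append_singleton (H₂ ++ [a]) b x (by simp),
    lmin_append_singleton (H₂ ++ [a]) newl x (by simp)]
  have hMa : lmin (H₂ ++ [a]) x ≤ lval a x := lmin_le _ a (by simp) x
  have hp := lval_bad_pop hs1 hs2 hbad x
  omega

theorem addLoop_spec : ∀ (n : Nat) (H : List (Int × Int)) (newl : Int × Int),
    H.length = n →
    goodExceptLast (H ++ [newl]) → decSlope (H ++ [newl]) →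
    ∃ r, r ≤ H.length ∧
      chtAddLoop ((H ++ [newl]).map Prod.fst) ((H ++ [newl]).map Prod.snd)
        = ((H.take r ++ [newl]).map Prod.fst, (H.take r ++ [newl]).map Prod.snd) ∧
      goodL (H.take r ++ [newl]) ∧
      (∀ x, lmin (H.take r ++ [newl]) x = lmin (H ++ [newl]) x) := by
  intro n
  induction n using Nat.strong_induction_on with
  | _ n ih =>
    intro H newl hlen hge hdec
    rw [chtAddLoop]
    split
    · rename_i hc
      obtain ⟨hc3, hcb⟩ := hc
      have hX3 : 3 ≤ (H ++ [newl]).length := by simpa using hc3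
      have hH2 : 2 ≤ H.length := by simp at hX3; omega
      obtain ⟨H₂, a, b, rfl⟩ := two_from_right H hH2
      have hXeq : (H₂ ++ [a, b]) ++ [newl] = H₂ ++ [a, b, newl] := by simp
      -- the popped lists
      have hpopf : popSnd (((H₂ ++ [a, b]) ++ [newl]).map Prod.fst)
          = (((H₂ ++ [a]) ++ [newl]).map Prod.fst) := by
        rw [popSnd_map, show (H₂ ++ [a, b]) ++ [newl] = (H₂ ++ [a]) ++ [b, newl] by simp,
          popSnd_two]
      have hpops : popSnd (((H₂ ++ [a, b]) ++ [newl]).map Prod.snd)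
          = (((H₂ ++ [a]) ++ [newl]).map Prod.snd) := by
        rw [popSnd_map, show (H₂ ++ [a, b]) ++ [newl] = (H₂ ++ [a]) ++ [b, newl] by simp,
          popSnd_two]
      rw [hpopf, hpops]
      -- slopes of the bad triple
      have hsub : [a, b, newl].Sublist ((H₂ ++ [a, b]) ++ [newl]) := by
        rw [hXeq]
        exact List.sublist_append_right H₂ _
      have hp3 : ([a, b, newl]).Pairwise (fun p q => q.1 < p.1) :=
        List.Pairwise.sublist hsub hdec
      simp only [List.pairwise_cons] at hp3
      have hs1 : b.1 < a.1 := hp3.1 b (by simp)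
      have hs2 : newl.1 < b.1 := hp3.2.1 newl (by simp)
      have hbad : isBadL a b newl := by
        have h3 : 3 ≤ ((H₂ ++ [a, b]) ++ [newl]).length := by simpa using hc3
        have hb := (chtIsBad_eq ((H₂ ++ [a, b]) ++ [newl]) h3).mp hcb
        rw [hXeq, getD_trip_a, getD_trip_b, getD_trip_c] at hb
        exact hb
      have hpre : (H₂ ++ [a]).Sublist (H₂ ++ [a, b]) := by
        have : H₂ ++ [a, b] = (H₂ ++ [a]) ++ [b] := by simp
        rw [this]
        exact (List.prefix_append _ _).sublist
      have hsub2 : ((H₂ ++ [a]) ++ [newl]).Sublist ((H₂ ++ [a, b]) ++ [newl]) :=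
        hpre.append_right _
      have hge' : goodExceptLast ((H₂ ++ [a]) ++ [newl]) := by
        intro k hk
        simp only [List.length_append, List.length_cons, List.length_nil] at hk
        have hb2 : (H₂ ++ [a]).length = H₂.length + 1 := by simp
        have hk' : k + 2 < (H₂ ++ [a]).length := by omega
        have hab : H₂ ++ [a, b] = (H₂ ++ [a]) ++ [b] := by simp
        have hrewr : ∀ j, j < (H₂ ++ [a]).length →
            ((H₂ ++ [a, b]) ++ [newl]).getD j (0, 0) = ((H₂ ++ [a]) ++ [newl]).getD j (0, 0) := by
          intro j hj
          rw [List.getD_append _ _ _ _ hj,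
            List.getD_append _ _ _ _ (by simp at hj ⊢; omega), hab,
            List.getD_append _ _ _ _ hj]
        have hg := hge k (by simp; omega)
        rw [hrewr k (by omega), hrewr (k + 1) (by omega), hrewr (k + 2) (by omega)] at hg
        exact hg
      have hdec' : decSlope ((H₂ ++ [a]) ++ [newl]) := List.Pairwise.sublist hsub2 hdec
      obtain ⟨r', hr', heq, hgood', hmin'⟩ :=
        ih (H₂ ++ [a]).length (by simp at hlen ⊢; omega) (H₂ ++ [a]) newl rfl hge' hdec'
      have htake : (H₂ ++ [a, b]).take r' = (H₂ ++ [a]).take r' := by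
        rw [show H₂ ++ [a, b] = (H₂ ++ [a]) ++ [b] by simp,
          List.take_append_of_le_length hr']
      refine ⟨r', by simp at hr' ⊢; omega, by rw [htake]; exact heq, by rw [htake]; exact hgood',
        fun x => ?_⟩
      rw [htake, hmin' x, hXeq]
      exact pop_min_pres H₂ a b newl hs1 hs2 hbad x
    · rename_i hc
      have htk : List.take H.length H = H := List.take_length
      refine ⟨H.length, le_refl _, by rw [htk], ?_, fun x => by rw [htk]⟩
      rw [goodL, htk]
      intro k hk
      by_cases hlast : k + 3 < (H ++ [newl]).length
      · exact hge k hlast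
      · have hk2 : k + 3 = (H ++ [newl]).length := by omega
        have hc' : ¬ ((3:Nat) ≤ ((H ++ [newl]).map Prod.fst).length ∧
            chtIsBad ((H ++ [newl]).map Prod.fst) ((H ++ [newl]).map Prod.snd)
              ((((H ++ [newl]).map Prod.fst).length : Int) - 3)
              ((((H ++ [newl]).map Prod.fst).length : Int) - 2)
              ((((H ++ [newl]).map Prod.fst).length : Int) - 1) = true) := hc
      -- derive notBad for the last triple
        have h3 : 3 ≤ (H ++ [newl]).length := by
          have h4 := hk2
          simp at h4 ⊢
          omega
        have hnb := (not_and.mp hc') (by simpa using h3)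
        rw [chtIsBad_eq _ h3] at hnb
        have e3 : (H ++ [newl]).length - 3 = k := by omega
        have e2 : (H ++ [newl]).length - 2 = k + 1 := by omega
        have e1 : (H ++ [newl]).length - 1 = k + 2 := by omega
        rw [e3, e2, e1] at hnb
        exact hnb

theorem slope_getD_lt (X : List (Int × Int)) (hd : decSlope X) {j k : Nat}
    (hjk : j < k) (hk : k < X.length) :
    (X.getD k (0, 0)).1 < (X.getD j (0, 0)).1 := by
  rw [List.getD_eq_getElem _ _ hk, List.getD_eq_getElem _ _ (by omega)]
  exact (List.pairwise_iff_getElem.mp hd) j k (by omega) hk hjk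

theorem chain_mono (X : List (Int × Int)) (hg : goodL X) (hd : decSlope X) (x : Int)
    (j : Nat) (hj : j + 1 < X.length)
    (hbase : lval (X.getD j (0, 0)) x ≤ lval (X.getD (j + 1) (0, 0)) x) :
    ∀ k, j ≤ k → k + 1 < X.length →
      lval (X.getD k (0, 0)) x ≤ lval (X.getD (k + 1) (0, 0)) x := by
  intro k
  induction k with
  | zero =>
    intro hjk _
    have : j = 0 := by omega
    subst this
    exact hbase
  | succ k ihk =>
    intro hjk hk1
    rcases Nat.lt_or_ge j (k + 1) with h' | h'
    · have hprev := ihk (by omega) (by omega)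
      exact lval_good_step (slope_getD_lt X hd (by omega) (by omega))
        (slope_getD_lt X hd (by omega) (by omega)) (hg k (by omega)) x hprev
    · have : j = k + 1 := by omega
      subst this
      exact hbase

theorem suffix_min_from (X : List (Int × Int)) (hg : goodL X) (hd : decSlope X) (x : Int)
    (q : Nat) (hq : q < X.length)
    (hstop : q + 1 = X.length ∨ (q + 1 < X.length ∧
      lval (X.getD q (0, 0)) x ≤ lval (X.getD (q + 1) (0, 0)) x)) :
    ∀ k, q ≤ k → k < X.length → lval (X.getD q (0, 0)) x ≤ lval (X.getD k (0, 0)) x := by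
  intro k
  induction k with
  | zero =>
    intro hqk _
    have : q = 0 := by omega
    subst this
    exact le_refl _
  | succ k ihk =>
    intro hqk hk
    rcases Nat.lt_or_ge q (k + 1) with h' | h'
    · rcases hstop with hs | ⟨hs1, hs2⟩
      · omega
      · have hprev := ihk (by omega) (by omega)
        exact hprev.trans (chain_mono X hg hd x q hs1 hs2 k (by omega) hk)
    · have : q = k + 1 := by omega
      subst this
      exact le_refl _

theorem queryLoop_spec : ∀ (fuel : Nat) (X : List (Int × Int)) (q : Nat) (x : Int),
    X.length - q = fuel →
    goodL X → decSlope X → q < X.length →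
    ∃ qstar : Nat,
      chtQueryLoop (X.map Prod.fst) (X.map Prod.snd) ((q : Nat) : Int) x = ((qstar : Nat) : Int) ∧
      q ≤ qstar ∧ qstar < X.length ∧
      (∀ k, q ≤ k → k < qstar →
        lval (X.getD qstar (0, 0)) x < lval (X.getD k (0, 0)) x) ∧
      (∀ k, qstar ≤ k → k < X.length →
        lval (X.getD qstar (0, 0)) x ≤ lval (X.getD k (0, 0)) x) := by
  intro fuel
  induction fuel using Nat.strong_induction_on with
  | _ fuel ih =>
    intro X q x hfuel hg hd hq
    rw [chtQueryLoop]
    by_cases hA : (q : Int) < ((X.map Prod.fst).length : Int) - 1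
    · have hq1 : q + 1 < X.length := by simp at hA; omega
      have e1 : ((q : Nat) : Int) + 1 = ((q + 1 : Nat) : Int) := by push_cast; ring
      by_cases hB : lval (X.getD (q + 1) (0, 0)) x < lval (X.getD q (0, 0)) x
      · rw [if_pos]
        · rw [e1]
          obtain ⟨qstar, heq, hle, hlt, hchain, hsuf⟩ :=
            ih (X.length - (q + 1)) (by omega) X (q + 1) x rfl hg hd hq1
          refine ⟨qstar, heq, by omega, hlt, ?_, hsuf⟩
          intro k hk1 hk2
          rcases Nat.lt_or_ge q k with h' | h'
          · exact hchain k h' hk2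
          · have : k = q := by omega
            subst this
            rcases Nat.lt_or_ge (k + 1) qstar with h'' | h''
            · exact (hchain (k + 1) (le_refl _) h'').trans hB
            · have : qstar = k + 1 := by omega
              rw [this]
              exact hB
        · constructor
          · exact hA
          · rw [e1, pyGetD_map_fst_int X _ hq1, pyGetD_map_snd_int X _ hq1,
              pyGetD_map_fst_int X _ (by omega), pyGetD_map_snd_int X _ (by omega)]
            simp only [lval] at hB
            exact hB
      · rw [if_neg]
        · refine ⟨q, rfl, le_refl _, hq, by omega, ?_⟩
          exact suffix_min_from X hg hd x q hq (Or.inr ⟨hq1, by omega⟩)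
        · intro hcond
          obtain ⟨_, hc2⟩ := hcond
          rw [e1, pyGetD_map_fst_int X _ hq1, pyGetD_map_snd_int X _ hq1,
            pyGetD_map_fst_int X _ (by omega), pyGetD_map_snd_int X _ (by omega)] at hc2
          simp only [lval] at hB
          exact hB hc2
    · rw [if_neg (by intro hcond; exact hA hcond.1)]
      have hqlen : q + 1 = X.length := by simp at hA; omega
      refine ⟨q, rfl, le_refl _, hq, by omega, ?_⟩
      exact suffix_min_from X hg hd x q hq (Or.inl hqlen)

theorem chtQuery_spec (X : List (Int × Int)) (p x : Int)
    (hne : 1 ≤ X.length) (hg : goodL X) (hd : decSlope X) (hp : 0 ≤ p)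
    (hK2 : ∀ k : Nat, (k : Int) < p → k + 1 < X.length → lmin X x < lval (X.getD k (0, 0)) x) :
    ∃ qstar : Nat,
      chtQuery (X.map Prod.fst) (X.map Prod.snd) p x = (lmin X x, ((qstar : Nat) : Int)) ∧
      qstar < X.length ∧
      lval (X.getD qstar (0, 0)) x = lmin X x ∧
      (∀ k : Nat, k < qstar → lval (X.getD qstar (0, 0)) x < lval (X.getD k (0, 0)) x) := by
  -- the clamped pointer, as a Nat
  have hclamp : ∃ q : Nat,
      (if p ≥ ((X.map Prod.fst).length : Int) then ((X.map Prod.fst).length : Int) - 1 else p)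
        = ((q : Nat) : Int) ∧ q < X.length ∧
      (∀ k : Nat, k < q → (k : Int) < p ∧ k + 1 < X.length) := by
    by_cases hc : p ≥ ((X.map Prod.fst).length : Int)
    · refine ⟨X.length - 1, by rw [if_pos hc]; simp; omega, by omega, ?_⟩
      intro k hk
      simp at hc
      constructor
      · omega
      · omega
    · refine ⟨p.toNat, by rw [if_neg hc]; omega, by simp at hc; omega, ?_⟩
      intro k hk
      simp at hc
      constructor
      · omega
      · omega
  obtain ⟨q, hqeq, hqlen, hqk⟩ := hclamp
  obtain ⟨qstar, hloop, hqq, hqsl, hchain, hsuf⟩ :=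
    queryLoop_spec (X.length - q) X q x rfl hg hd hqlen
  have hstrictq : ∀ k : Nat, k < q → lmin X x < lval (X.getD k (0, 0)) x := by
    intro k hk
    exact hK2 k (hqk k hk).1 (hqk k hk).2
  -- the pointed value is the global minimum
  have hmain : lval (X.getD qstar (0, 0)) x = lmin X x := by
    have hub : lmin X x ≤ lval (X.getD qstar (0, 0)) x := by
      apply lmin_le
      rw [List.getD_eq_getElem _ _ hqsl]
      exact List.getElem_mem hqsl
    obtain ⟨k0, hk0, hat⟩ := lmin_attained X x (by intro h; rw [h] at hne; simp at hne)
    rcases Nat.lt_or_ge k0 q with h1 | h1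
    · have := hstrictq k0 h1
      omega
    · rcases Nat.lt_or_ge k0 qstar with h2 | h2
      · have := hchain k0 h1 h2
        omega
      · have := hsuf k0 h2 hk0
        omega
  refine ⟨qstar, ?_, hqsl, hmain, ?_⟩
  · simp only [chtQuery]
    rw [hqeq, hloop, pyGetD_map_fst_int X qstar hqsl, pyGetD_map_snd_int X qstar hqsl]
    rw [show (X.getD qstar (0, 0)).1 * x + (X.getD qstar (0, 0)).2 = lval (X.getD qstar (0, 0)) x from rfl,
      hmain]
  · intro k hk
    rcases Nat.lt_or_ge k q with h1 | h1
    · rw [hmain]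
      exact hstrictq k h1
    · exact hchain k h1 hk

def entryF (F : List (Int × Int)) (dp : List Int) (i : Nat) : Int :=
  imin ((List.range (i + 1)).map (fun j =>
    (F.getD j (0, 0)).2 * (F.getD i (0, 0)).1 + if j = 0 then 0 else dp.getD (j - 1) 0))

def DPt (F : List (Int × Int)) : Nat → List Int
  | 0 => []
  | k + 1 => DPt F k ++ [entryF F (DPt F k) k]

def dpv (F : List (Int × Int)) (i : Nat) : Int := (DPt F (i + 1)).getD i 0

def icv (F : List (Int × Int)) (j : Nat) : Int := if j = 0 then 0 else dpv F (j - 1)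

def widF (F : List (Int × Int)) (i : Nat) : Int := (F.getD i (0, 0)).1

def hgtF (F : List (Int × Int)) (i : Nat) : Int := (F.getD i (0, 0)).2

def lineF (F : List (Int × Int)) (j : Nat) : Int × Int := (hgtF F j, icv F j)

def allL (F : List (Int × Int)) (i : Nat) : List (Int × Int) :=
  (List.range (i + 1)).map (lineF F)

def INV (F : List (Int × Int)) (i : Nat) (st : List Int × List Int × Int × Int) : Prop :=
  ∃ H : List (Int × Int),
    st.1 = H.map Prod.fst ∧ st.2.1 = H.map Prod.snd ∧
    1 ≤ H.length ∧
    (∀ x, lmin H x = lmin (allL F i) x) ∧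
    decSlope H ∧
    (∀ l ∈ H, hgtF F i ≤ l.1) ∧
    goodL H ∧
    0 ≤ st.2.2.1 ∧
    (∀ x' : Int, (1 ≤ i → widF F (i - 1) ≤ x') →
      ∀ k : Nat, (k : Int) < st.2.2.1 → k + 1 < H.length →
        lmin H x' < lval (H.getD k (0, 0)) x') ∧
    st.2.2.2 = if i = 0 then 0 else dpv F (i - 1)

theorem DPt_length (F : List (Int × Int)) (k : Nat) : (DPt F k).length = k := by
  induction k with
  | zero => rfl
  | succ k ih => simp [DPt, ih]

theorem dpv_def (F : List (Int × Int)) (i : Nat) : dpv F i = entryF F (DPt F i) i := by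
  rw [dpv, DPt, List.getD_eq_getElem _ _ (by simp [DPt_length])]
  rw [List.getElem_append_right (by simp [DPt_length])]
  simp [DPt_length]

theorem DPt_getD_dpv (F : List (Int × Int)) {j k : Nat} (h : j < k) :
    (DPt F k).getD j 0 = dpv F j := by
  induction k with
  | zero => omega
  | succ k ih =>
    rcases Nat.lt_or_ge j k with h' | h'
    · rw [DPt, List.getD_eq_getElem _ _ (by simp [DPt_length]; omega),
        List.getElem_append_left (by simp [DPt_length]; omega),
        ← List.getD_eq_getElem _ _ (by simp [DPt_length]; omega), ih h']
    · have : j = k := by omega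
      subst this
      rw [← dpv, dpv]

theorem dpv_eq_lmin (F : List (Int × Int)) (i : Nat) :
    dpv F i = lmin (allL F i) (widF F i) := by
  rw [dpv_def, entryF, lmin, allL, List.map_map]
  apply congrArg imin
  apply List.map_congr_left
  intro j hj
  have hji : j < i + 1 := List.mem_range.mp hj
  simp only [Function.comp_apply, lineF, lval, widF, hgtF, icv]
  cases j with
  | zero => simp
  | succ j' =>
    simp only [if_neg (Nat.succ_ne_zero j'), Nat.add_sub_cancel]
    rw [DPt_getD_dpv F (by omega)]

theorem allL_succ (F : List (Int × Int)) (i : Nat) :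
    allL F (i + 1) = allL F i ++ [lineF F (i + 1)] := by
  rw [allL, allL, List.range_succ, List.map_append, List.map_cons, List.map_nil]

theorem allL_ne_nil (F : List (Int × Int)) (i : Nat) : allL F i ≠ [] := by
  simp [allL, List.range_succ]

theorem getD_take_append {α : Type} [Inhabited α] (H : List α) (r k : Nat) (w : α) (d : α)
    (hk : k < r) (hr : r ≤ H.length) :
    (H.take r ++ [w]).getD k d = H.getD k d := by
  rw [List.getD_append _ _ _ _ (by simp [List.length_take]; omega),
    List.getD_eq_getElem _ _ (by simp [List.length_take]; omega),
    List.getElem_take, List.getD_eq_getElem _ _ (by omega)]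

theorem step_INV (F : List (Int × Int))
    (hFw : ∀ i j : Nat, i < j → j < F.length → widF F i < widF F j)
    (hFh : ∀ i j : Nat, i < j → j < F.length → hgtF F j < hgtF F i)
    (i : Nat) (hi : i < F.length)
    (st : List Int × List Int × Int × Int) (hinv : INV F i st) :
    (i + 1 < F.length → INV F (i + 1) (aStep F st (i : Int))) ∧
    (i + 1 = F.length → (aStep F st (i : Int)).2.2.2 = dpv F (F.length - 1)) := by
  obtain ⟨S, B, p, cost⟩ := st
  obtain ⟨H, hS, hB, hlen, hall, hdec, hslope, hgood, hp0, hK2, hcost⟩ := hinv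
  simp only at hS hB hp0 hK2 hcost
  subst hS hB
  set x := widF F i with hxdef
  -- the query
  have hK2x : ∀ k : Nat, (k : Int) < p → k + 1 < H.length →
      lmin H x < lval (H.getD k (0, 0)) x := by
    intro k hk1 hk2
    apply hK2 x ?_ k hk1 hk2
    intro hi1
    rcases Nat.lt_or_ge 0 i with h0 | h0
    · exact le_of_lt (hFw (i - 1) i (by omega) hi)
    · omega
  obtain ⟨qstar, hqr, hqlen, hqval, hqstrict⟩ := chtQuery_spec H p x hlen hgood hdec hp0 hK2x
  have hlminH : lmin H x = dpv F i := by
    rw [hall x, ← dpv_eq_lmin]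
  have hwidth : (PySem.List.pyGetD F ((i : Nat) : Int) (0, 0)).1 = x := by
    rw [PySem.List.pyGetD_natCast]; rfl
  -- strictness transported to later query points
  have hfuture : ∀ x' : Int, x ≤ x' → ∀ k : Nat, k < qstar → k < H.length →
      lval (H.getD qstar (0, 0)) x' < lval (H.getD k (0, 0)) x' := by
    intro x' hx' k hk hkl
    exact lval_slope_mono (slope_getD_lt H hdec hk hqlen) hx' (hqstrict k hk)
  constructor
  · -- continue: add the next line
    intro hi1
    have hbranch : ((i : Nat) : Int) < ((F.length : Nat) : Int) - 1 := by
      push_cast; omega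
    rw [aStep]
    simp only [hwidth, hqr, if_pos hbranch]
    rw [hlminH]
    have hcast : ((i : Nat) : Int) + 1 = ((i + 1 : Nat) : Int) := by push_cast; ring
    rw [hcast, PySem.List.pyGetD_natCast]
    set newl : Int × Int := (hgtF F (i + 1), dpv F i) with hnewl
    have hslopeD : (F.getD (i + 1) (0, 0)).2 = newl.1 := rfl
    -- chtAdd in terms of the hull H ++ [newl]
    have hSmap : H.map Prod.fst ++ [(F.getD (i + 1) (0, 0)).2] = (H ++ [newl]).map Prod.fst := by
      rw [List.map_append]; rfl
    have hBmap : H.map Prod.snd ++ [dpv F i] = (H ++ [newl]).map Prod.snd := by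
      rw [List.map_append]; rfl
    have hgel : goodExceptLast (H ++ [newl]) := by
      intro k hk
      simp only [List.length_append, List.length_cons, List.length_nil] at hk
      have h1 : k + 2 < H.length := by omega
      rw [List.getD_append _ _ _ _ (by omega), List.getD_append _ _ _ _ (by omega),
        List.getD_append _ _ _ _ (by omega)]
      exact hgood k h1
    have hnsl : ∀ a ∈ H, newl.1 < a.1 := by
      intro a ha
      have h1 : hgtF F (i + 1) < hgtF F i := hFh i (i + 1) (by omega) hi1
      have h2 := hslope a ha
      simp only [hnewl]
      omega
    have hdec2 : decSlope (H ++ [newl]) := by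
      rw [decSlope, List.pairwise_append]
      refine ⟨hdec, List.pairwise_singleton _ _, ?_⟩
      intro a ha b hb
      rw [List.mem_singleton] at hb
      subst hb
      exact hnsl a ha
    obtain ⟨r, hr, heq, hgood', hmin'⟩ :=
      addLoop_spec H.length H newl rfl hgel hdec2
    rw [chtAdd, hSmap, hBmap, heq]
    refine ⟨H.take r ++ [newl], rfl, rfl, by simp, ?_, ?_, ?_, hgood', by positivity, ?_, by simp⟩
    · -- lmin invariant
      intro x0
      rw [hmin' x0, lmin_append_singleton H newl x0 (by intro h; rw [h] at hlen; simp at hlen),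
        allL_succ, lmin_append_singleton _ _ _ (allL_ne_nil F i), hall x0]
      rfl
    · -- decSlope
      exact List.Pairwise.sublist (List.Sublist.append (List.take_sublist r H) (by rfl)) hdec2
    · -- slope lower bound
      intro l hl
      rcases List.mem_append.mp hl with hl1 | hl2
      · have h1 : hgtF F (i + 1) < hgtF F i := hFh i (i + 1) (by omega) hi1
        have h2 := hslope l ((List.take_sublist r H).mem hl1)
        omega
      · rw [List.mem_singleton] at hl2
        subst hl2
        exact le_refl _
    · -- pointer invariant at i+1
      intro x' hx' k hk1 hk2
      have hxx' : x ≤ x' := by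
        have := hx' (by omega)
        simpa using this
      have hkr : k < r := by
        simp only [List.length_append, List.length_take, List.length_cons, List.length_nil] at hk2
        omega
      have hkH : k < H.length := by omega
      rw [getD_take_append H r k newl (0, 0) hkr hr]
      have hqstar : k < qstar := by
        have hk1' : (k : Int) < ((qstar : Nat) : Int) := hk1
        exact_mod_cast hk1'
      have hstep1 : lval (H.getD qstar (0, 0)) x' < lval (H.getD k (0, 0)) x' :=
        hfuture x' hxx' k hqstar hkH
      have hstep2 : lmin (H.take r ++ [newl]) x' ≤ lval (H.getD qstar (0, 0)) x' := by
      -- lmin H' ≤ lmin (H ++ [newl]) restricted to member H[qstar]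
        rw [hmin' x']
        have hmem : H.getD qstar (0, 0) ∈ H ++ [newl] := by
          apply List.mem_append_left
          rw [List.getD_eq_getElem _ _ hqlen]
          exact List.getElem_mem hqlen
        exact lmin_le _ _ hmem x'
      omega
  · -- last iteration: no add, result is the final cost
    intro hi1
    have hbranch : ¬ (((i : Nat) : Int) < ((F.length : Nat) : Int) - 1) := by
      push_cast; omega
    rw [aStep]
    simp only [hwidth, hqr, if_neg hbranch]
    have : i = F.length - 1 := by omega
    subst this
    simpa using hlminH

theorem fold_INV (F : List (Int × Int))
    (hFw : ∀ i j : Nat, i < j → j < F.length → widF F i < widF F j)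
    (hFh : ∀ i j : Nat, i < j → j < F.length → hgtF F j < hgtF F i) :
    ∀ (fuel i : Nat) (st : List Int × List Int × Int × Int),
      i + fuel = F.length → i < F.length → INV F i st →
      ((PySem.List.pyRange ((i : Nat) : Int) ((F.length : Nat) : Int) 1).foldl
        (aStep F) st).2.2.2 = dpv F (F.length - 1) := by
  intro fuel
  induction fuel with
  | zero => intro i st h1 h2 _; omega
  | succ fuel ih =>
    intro i st h1 h2 hinv
    rw [PySem.List.pyRange_one_cons (by exact_mod_cast h2), List.foldl_cons]
    obtain ⟨hstep, hlast⟩ := step_INV F hFw hFh i h2 st hinv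
    rcases Nat.lt_or_ge (i + 1) F.length with hlt | hge
    · have hcast : ((i : Nat) : Int) + 1 = ((i + 1 : Nat) : Int) := by push_cast; ring
      rw [hcast]
      exact ih (i + 1) (aStep F st (i : Int)) (by omega) hlt (hstep hlt)
    · have hieq : i + 1 = F.length := by omega
      rw [PySem.List.pyRange_one_eq_nil (by omega), List.foldl_nil]
      exact hlast hieq
-- ==== from s12: sorted2 order ====

def lt2 (a b : Int × Int) : Bool :=
  decide (a.1 < b.1) || (!decide (b.1 < a.1) && decide (a.2 < b.2))

theorem sorted2_eq_foldl (xs : List (Int × Int)) :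
    PySem.List.sorted2 xs (fun t => t.1) (fun t => t.2) =
      xs.foldl (fun acc x => PySem.List.insertBy lt2 x acc) [] := rfl

theorem lt2_asym {a b : Int × Int} (h : lt2 a b = true) : lt2 b a = false := by
  simp [lt2] at *; omega

theorem lt2_trans_neg {z y x : Int × Int} (h1 : lt2 z y = false) (h2 : lt2 x y = true) :
    lt2 z x = false := by
  simp [lt2] at *; omega

theorem insertBy_pairwise (x : Int × Int) (ys : List (Int × Int))
    (h : ys.Pairwise (fun a b => lt2 b a = false)) :
    (PySem.List.insertBy lt2 x ys).Pairwise (fun a b => lt2 b a = false) := by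
  induction ys with
  | nil => simp [PySem.List.insertBy]
  | cons y ys ih =>
    rw [PySem.List.insertBy]
    split
    · rename_i hxy
      refine List.Pairwise.cons ?_ h
      intro z hz
      rcases List.mem_cons.mp hz with rfl | hz'
      · exact lt2_asym hxy
      · exact lt2_trans_neg (List.rel_of_pairwise_cons h hz') hxy
    · rename_i hxy
      refine List.Pairwise.cons ?_ (ih h.tail)
      intro z hz
      rcases (PySem.List.mem_insertBy _ _ _ _).mp hz with rfl | hz'
      · simpa using hxy
      · exact List.rel_of_pairwise_cons h hz'

theorem foldl_insertBy_pairwise (xs : List (Int × Int)) :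
    ∀ acc, acc.Pairwise (fun a b => lt2 b a = false) →
      (xs.foldl (fun acc x => PySem.List.insertBy lt2 x acc) acc).Pairwise
        (fun a b => lt2 b a = false) := by
  induction xs with
  | nil => intro acc h; exact h
  | cons x xs ih =>
    intro acc h
    exact ih _ (insertBy_pairwise x acc h)

theorem sorted2_pairwise_lex (xs : List (Int × Int)) :
    (PySem.List.sorted2 xs (fun t => t.1) (fun t => t.2)).Pairwise
      (fun a b => a.1 < b.1 ∨ (a.1 = b.1 ∧ a.2 ≤ b.2)) := by
  have h := foldl_insertBy_pairwise xs [] List.Pairwise.nil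
  rw [← sorted2_eq_foldl] at h
  refine h.imp ?_
  intro a b hab
  simp [lt2] at hab
  omega

-- ==== from s8/s9/s11: the dominance filter ====

def sfx : List (Int × Int) → List (Int × Int)
  | [] => []
  | a :: t => if t.all (fun b => decide (b.2 < a.2)) then a :: sfx t else sfx t

theorem sfx_sublist (l : List (Int × Int)) : (sfx l).Sublist l := by
  induction l with
  | nil => simp [sfx]
  | cons a t ih =>
    rw [sfx]
    split
    · exact ih.cons₂ a
    · exact ih.cons a

theorem sfx_pairwise (l : List (Int × Int)) : (sfx l).Pairwise (fun a b => b.2 < a.2) := by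
  induction l with
  | nil => exact List.Pairwise.nil
  | cons a t ih =>
    rw [sfx]
    split
    · rename_i h
      refine List.Pairwise.cons (fun b hb => ?_) ih
      have hbt : b ∈ t := (sfx_sublist t).mem hb
      simpa using (List.all_eq_true.mp h) b hbt
    · exact ih

theorem sfx_ne_nil (l : List (Int × Int)) (h : l ≠ []) : sfx l ≠ [] := by
  induction l with
  | nil => simp at h
  | cons a t ih =>
    rw [sfx]
    split
    · simp
    · rename_i hc
      have ht : t ≠ [] := by
        rintro rfl
        simp at hc
      exact ih ht

-- the two key pairwise facts about F = sfx (sorted input)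

theorem sfx_facts (plots' : List (Int × Int))
    (hlex : plots'.Pairwise (fun a b => a.1 < b.1 ∨ (a.1 = b.1 ∧ a.2 ≤ b.2))) :
    (∀ i j : Nat, i < j → j < (sfx plots').length → widF (sfx plots') i < widF (sfx plots') j) ∧
    (∀ i j : Nat, i < j → j < (sfx plots').length → hgtF (sfx plots') j < hgtF (sfx plots') i) := by
  have h1 : (sfx plots').Pairwise (fun a b => a.1 < b.1 ∧ b.2 < a.2) := by
    have hl : (sfx plots').Pairwise (fun a b => a.1 < b.1 ∨ (a.1 = b.1 ∧ a.2 ≤ b.2)) :=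
      hlex.sublist (sfx_sublist plots')
    have hh := sfx_pairwise plots'
    refine (hl.and hh).imp ?_
    rintro a b ⟨hab, hba⟩
    constructor
    · rcases hab with h | ⟨h1, h2⟩
      · exact h
      · omega
    · exact hba
  have hg := List.pairwise_iff_getElem.mp h1
  constructor
  · intro i j hij hj
    have := hg i j (by omega) hj hij
    rw [widF, widF, List.getD_eq_getElem _ _ (by omega), List.getD_eq_getElem _ _ hj]
    exact this.1
  · intro i j hij hj
    have := hg i j (by omega) hj hij
    rw [hgtF, hgtF, List.getD_eq_getElem _ _ hj, List.getD_eq_getElem _ _ (by omega)]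
    exact this.2

theorem aPopDom_of_pairwise (L : List (Int × Int)) (h : Int)
    (hp : L.Pairwise (fun a b => b.2 < a.2)) :
    aPopDom L h = L.filter (fun b => decide (h < b.2)) := by
  induction L using List.reverseRecOn with
  | nil => rw [aPopDom]; simp
  | append_singleton L a ih =>
    rw [aPopDom]
    rw [List.filter_append]
    by_cases hc : a.2 ≤ h
    · have hcond : (L ++ [a] ≠ [] ∧ (PySem.List.pyGetD (L ++ [a]) (-1) (0, 0)).2 ≤ h) := by
        refine ⟨by simp, ?_⟩
        rw [PySem.List.pyGetD_neg_one_append_singleton]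
        exact hc
      rw [if_pos hcond, List.dropLast_concat]
      have ha : ([a].filter (fun b => decide (h < b.2))) = [] := by
        simp
        omega
      rw [ha, List.append_nil]
      exact ih (hp.sublist (by simp))
    · have hcond : ¬ (L ++ [a] ≠ [] ∧ (PySem.List.pyGetD (L ++ [a]) (-1) (0, 0)).2 ≤ h) := by
        rw [PySem.List.pyGetD_neg_one_append_singleton]
        push_neg
        intro _
        omega
      rw [if_neg hcond]
      have h1 : L.filter (fun b => decide (h < b.2)) = L := by
        rw [List.filter_eq_self]
        intro b hb
        have : a.2 < b.2 := by
          have := List.pairwise_append.mp hp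
          exact this.2.2 b hb a (by simp)
        simp; omega
      have h2 : [a].filter (fun b => decide (h < b.2)) = [a] := by simp; omega
      rw [h1, h2]

theorem sfx_append_singleton (l : List (Int × Int)) (p : Int × Int) :
    sfx (l ++ [p]) = (sfx l).filter (fun b => decide (p.2 < b.2)) ++ [p] := by
  induction l with
  | nil => simp [sfx]
  | cons a t ih =>
    rw [List.cons_append, sfx, sfx, List.all_append, ih]
    by_cases h1 : t.all (fun b => decide (b.2 < a.2))
    · by_cases h2 : p.2 < a.2
      · rw [if_pos (by simp [h1, h2]), if_pos h1, List.filter_cons_of_pos (by simp [h2])]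
        simp
      · rw [if_neg (by simp [h2]), if_pos h1, List.filter_cons_of_neg (by simp [h2])]
    · rw [if_neg (by simp [h1]), if_neg h1]

theorem stack_eq_sfx (plots : List (Int × Int)) :
    plots.foldl (fun fl wh => aPopDom fl wh.2 ++ [wh]) [] = sfx plots := by
  induction plots using List.reverseRecOn with
  | nil => simp [sfx]
  | append_singleton l p ih =>
    rw [List.foldl_append, List.foldl_cons, List.foldl_nil, ih,
      aPopDom_of_pairwise _ _ (sfx_pairwise l), sfx_append_singleton]

def bfilterN (plots : List (Int × Int)) : List (Int × Int) :=
  (List.range plots.length).filterMap (fun i =>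
    if (plots.drop (i + 1)).all (fun b => decide (b.2 < (plots.getD i (0, 0)).2)) then
      some (plots.getD i (0, 0))
    else none)

theorem bfilterN_eq_sfx (plots : List (Int × Int)) : bfilterN plots = sfx plots := by
  induction plots with
  | nil => rfl
  | cons a t ih =>
    rw [bfilterN, sfx]
    rw [List.length_cons, List.range_succ_eq_map, List.filterMap_cons, List.filterMap_map]
    have hdrop : (a :: t).drop (0 + 1) = t := by simp
    have hget0 : (a :: t).getD 0 (0, 0) = a := rfl
    rw [hdrop, hget0]
    have hrest : (List.range t.length).filterMap
        ((fun i =>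
          if ((a :: t).drop (i + 1)).all (fun b => decide (b.2 < ((a :: t).getD i (0, 0)).2)) then
            some ((a :: t).getD i (0, 0))
          else none) ∘ Nat.succ) = bfilterN t := by
      apply List.filterMap_congr
      intro i hi
      simp only [Function.comp_apply, List.getD_cons_succ, List.drop_succ_cons]
    rw [hrest, ih]
    by_cases hc : t.all (fun b => decide (b.2 < a.2)) <;> simp [hc]

theorem bport_filter_eq (plots : List (Int × Int)) :
    ((PySem.List.pyRange 0 ((plots.length : Int)) 1).filterMap (fun i =>
      if (PySem.List.pyRange (i + 1) ((plots.length : Int)) 1).all (fun j =>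
          decide ((PySem.List.pyGetD plots j (0, 0)).2 < (PySem.List.pyGetD plots i (0, 0)).2)) then
        some (PySem.List.pyGetD plots i (0, 0))
      else none)) = bfilterN plots := by
  rw [PySem.List.pyRange_zero_natCast, List.filterMap_map, bfilterN]
  apply List.filterMap_congr
  intro i hi
  have hi' : i < plots.length := List.mem_range.mp hi
  have hmap := PySem.List.map_pyGetD_pyRange' plots (0, 0) (a := (i : Int) + 1) (by omega)
  have htn : ((i : Int) + 1).toNat = i + 1 := by omega
  rw [htn] at hmap
  simp only [Function.comp_apply, PySem.List.pyGetD_natCast]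
  have hcond : ((PySem.List.pyRange ((i : Int) + 1) ((plots.length : Int)) 1).all (fun j =>
      decide ((PySem.List.pyGetD plots j (0, 0)).2 < (plots.getD i (0, 0)).2)))
      = (plots.drop (i + 1)).all (fun b => decide (b.2 < (plots.getD i (0, 0)).2)) := by
    rw [← hmap, List.all_map]
    rfl
  rw [hcond]

theorem bMin_eq_imin (xs : List Int) (h : xs ≠ []) : bMin xs = imin xs := by
  cases xs with
  | nil => simp at h
  | cons a t => rw [bMin, PySem.List.min?_id_cons]; rfl

theorem bStep_eq (F : List (Int × Int)) (i : Nat) :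
    bStep F (DPt F i) (i : Int) = DPt F (i + 1) := by
  rw [bStep, DPt]
  congr 1
  have hc : ((i : Int) + 1) = ((i + 1 : Nat) : Int) := by push_cast; ring
  rw [hc, PySem.List.pyRange_zero_natCast, List.map_map]
  have hne : (List.range (i + 1)) ≠ [] := by simp
  rw [bMin_eq_imin _ (by simpa using hne)]
  rw [entryF]
  refine congrArg (fun v => ([v] : List Int)) (congrArg imin ?_)
  apply List.map_congr_left
  intro j hj
  simp only [Function.comp_apply, PySem.List.pyGetD_natCast]
  cases j with
  | zero => simp
  | succ j' =>
    have h1 : (0 : Int) < ((j' + 1 : Nat) : Int) := by positivity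
    have h2 : ((j' + 1 : Nat) : Int) - 1 = ((j' : Nat) : Int) := by push_cast; ring
    rw [if_pos h1, h2, PySem.List.pyGetD_natCast]
    simp

theorem bfold_eq (F : List (Int × Int)) (m : Nat) :
    (PySem.List.pyRange 0 ((m : Nat) : Int) 1).foldl (bStep F) [] = DPt F m := by
  rw [PySem.List.pyRange_zero_natCast, List.foldl_map]
  induction m with
  | zero => rfl
  | succ k ih =>
    rw [List.range_succ, List.foldl_append, ih, List.foldl_cons, List.foldl_nil, bStep_eq]

theorem chtAdd_nil (s c : Int) : chtAdd [] [] s c = ([s], [c]) := by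
  rw [chtAdd, chtAddLoop]
  simp

theorem INV_zero (F : List (Int × Int)) :
    INV F 0 ([(F.getD 0 (0, 0)).2], [(0 : Int)], (0 : Int), (0 : Int)) := by
  refine ⟨[(hgtF F 0, 0)], rfl, rfl, by simp, ?_, ?_, ?_, ?_, le_refl _, ?_, by simp⟩
  · intro x
    have : allL F 0 = [lineF F 0] := by simp [allL]
    rw [this]
    rfl
  · exact List.pairwise_singleton _ _
  · intro l hl
    rw [List.mem_singleton] at hl
    subst hl
    exact le_refl _
  · intro k hk
    simp at hk
  · intro x' _ k hk1 _
    simp only [] at hk1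
    omega

theorem A_master (plots : List (Int × Int)) (hne : plots ≠ []) :
    minimum_cost_land_acquisition plots =
      dpv (sfx (PySem.List.sorted2 plots (fun t => t.1) (fun t => t.2)))
        ((sfx (PySem.List.sorted2 plots (fun t => t.1) (fun t => t.2))).length - 1) := by
  rw [minimum_cost_land_acquisition]
  set plots' := PySem.List.sorted2 plots (fun t => t.1) (fun t => t.2) with hp'
  set F := sfx plots' with hF
  have hplots' : plots' ≠ [] := by
    intro h
    have := PySem.List.sorted2_perm plots (fun t => t.1) (fun t => t.2) false
    rw [hp'] at h
    rw [h] at this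
    exact hne (this.nil_eq).symm
  have hFne : F ≠ [] := sfx_ne_nil plots' hplots'
  have hm1 : 1 ≤ F.length := by
    cases hFx : F with
    | nil => exact absurd hFx hFne
    | cons a t => simp
  have hfacts := sfx_facts plots' (sorted2_pairwise_lex plots)
  rw [stack_eq_sfx, ← hF]
  rw [chtAdd_nil, PySem.List.pyGetD_zero]
  have h0 : ((0 : Nat) : Int) = (0 : Int) := rfl
  have := fold_INV F hfacts.1 hfacts.2 F.length 0 ([(F.getD 0 (0, 0)).2], [(0 : Int)], 0, 0)
    (by omega) (by omega) (INV_zero F)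
  rw [h0] at this
  exact this

theorem B_master (plots : List (Int × Int)) (hne : plots ≠ []) :
    minimum_cost_land_acquisition_alt plots =
      dpv (sfx (PySem.List.sorted2 plots (fun t => t.1) (fun t => t.2)))
        ((sfx (PySem.List.sorted2 plots (fun t => t.1) (fun t => t.2))).length - 1) := by
  rw [minimum_cost_land_acquisition_alt]
  set plots' := PySem.List.sorted2 plots (fun t => t.1) (fun t => t.2) with hp'
  set F := sfx plots' with hF
  have hplots' : plots' ≠ [] := by
    intro h
    have := PySem.List.sorted2_perm plots (fun t => t.1) (fun t => t.2) false
    rw [hp'] at h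
    rw [h] at this
    exact hne (this.nil_eq).symm
  have hFne : F ≠ [] := sfx_ne_nil plots' hplots'
  have hm1 : 1 ≤ F.length := by
    cases hFx : F with
    | nil => exact absurd hFx hFne
    | cons a t => simp
  rw [bport_filter_eq, bfilterN_eq_sfx, ← hF, bfold_eq]
  have hdne : DPt F F.length ≠ [] := by
    intro h
    have := DPt_length F F.length
    rw [h] at this
    simp at this
    omega
  rw [PySem.List.pyGetD_neg_one _ _ hdne, List.getLast_eq_getElem,
    ← List.getD_eq_getElem _ (0 : Int) (by rw [DPt_length]; omega)]
  rw [DPt_length]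
  exact DPt_getD_dpv F (by omega)

theorem final (plots : List (Int × Int)) (hne : plots ≠ []) :
    minimum_cost_land_acquisition plots = minimum_cost_land_acquisition_alt plots := by
  rw [A_master plots hne, B_master plots hne]

-- ===== VERDICT (by name: the statement is the Claim_ definition above) =====
theorem minimum_cost_land_acquisition_spec : Claim_equal_minimum_cost_land_acquisition := by
  intro plots _hdom hpre
  show minimum_cost_land_acquisition plots = minimum_cost_land_acquisition_alt plots
  exact final plots hpre
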